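-- pv_equiv track=rewrite | github.com/jubra97/speedos | src/utils.py | arg_maxes
-- ===== SOURCE A (Python) =====
-- def arg_maxes(arr, indices=None):
--     if len(arr) == 0:
--         return []
--
--     maxes = []
--     maximum = max(arr)
--     for idx, el in enumerate(arr):
--         if el == maximum:
--             if indices:
--                 maxes.append(indices[idx])
--             else:
--                 maxes.append(idx)
--     return maxes
-- ===== SOURCE B (Python) =====
-- def arg_maxes(arr, indices=None):
--     # One pass with a running maximum; positional result mapped through `indices` at the end.
--     best = None
--     maxes = []
--     for idx, el in enumerate(arr):
--         if best is None or el > best: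
--             best = el
--             maxes = [idx]
--         elif el == best:
--             maxes.append(idx)
--     if indices:
--         return [indices[i] for i in maxes]
--     return maxes
-- ===== Notes on version B (the rewrite author's own statement) =====
-- stated objective: alternative
-- what changed: Replaces the two-pass scheme (max(arr), then a filtering scan that maps through indices inline) by a single pass maintaining a running maximum and its positions, mapping through indices only once at the end; it trades the C-level max() prepass for one self-contained scan.
import Mathlib
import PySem

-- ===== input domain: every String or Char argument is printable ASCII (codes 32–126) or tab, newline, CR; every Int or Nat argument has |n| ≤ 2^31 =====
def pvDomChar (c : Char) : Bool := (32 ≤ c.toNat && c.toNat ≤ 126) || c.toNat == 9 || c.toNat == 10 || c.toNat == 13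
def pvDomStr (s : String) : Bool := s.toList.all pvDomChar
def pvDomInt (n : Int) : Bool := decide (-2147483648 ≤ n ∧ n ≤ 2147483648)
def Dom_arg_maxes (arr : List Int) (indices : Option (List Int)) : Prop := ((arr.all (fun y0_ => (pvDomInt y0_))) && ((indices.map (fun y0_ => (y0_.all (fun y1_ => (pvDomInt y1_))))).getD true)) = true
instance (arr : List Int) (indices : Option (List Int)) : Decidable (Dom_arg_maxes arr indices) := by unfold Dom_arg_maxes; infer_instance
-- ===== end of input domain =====

-- B replaces A's two passes (max(arr) then a filtering scan appending indices[idx] inline) by one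
-- running-maximum pass collecting positions, mapped through `indices` at the end.
-- Equivalence is about the RETURN value; neither version mutates its arguments.

-- ===== PORT A =====
-- Python truthiness of the `indices` argument: None and [] are falsy.
def pvTruthy (indices : Option (List Int)) : Bool :=
  match indices with
  | some (_ :: _) => true
  | _ => false

-- the value appended for a maximal position idx: `indices[idx] if indices else idx`
-- (pyGet? is some on every index reached under Pre_, so the `.getD 0` default is never used there)
def pvOutVal (indices : Option (List Int)) (idx : Int) : Int :=
  if pvTruthy indices then (PySem.List.pyGet? (indices.getD []) idx).getD 0 else idx

-- the `for idx, el in enumerate(arr)` loop of A, as structural recursion over the list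
def aLoop (maximum : Int) (indices : Option (List Int)) : List Int → Int → List Int → List Int
  | [], _, maxes => maxes
  | el :: rest, idx, maxes =>
      if el = maximum then aLoop maximum indices rest (idx + 1) (maxes ++ [pvOutVal indices idx])
      else aLoop maximum indices rest (idx + 1) maxes

def arg_maxes (arr : List Int) (indices : Option (List Int)) : List Int :=
  if arr.length = 0 then []
  else
    let maximum := (PySem.List.max? arr (fun x => x)).getD 0
    aLoop maximum indices arr 0 []

-- ===== PORT B =====
-- one pass: running maximum `best` (None before the first element) and the positions where it occurs
def altCollect : List Int → Int → Option Int → List Int → List Int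
  | [], _, _, maxes => maxes
  | el :: rest, idx, best, maxes =>
      match best with
      | none => altCollect rest (idx + 1) (some el) [idx]
      | some b =>
          if el > b then altCollect rest (idx + 1) (some el) [idx]
          else if el = b then altCollect rest (idx + 1) (some b) (maxes ++ [idx])
          else altCollect rest (idx + 1) (some b) maxes

def arg_maxes_alt (arr : List Int) (indices : Option (List Int)) : List Int :=
  let maxes := altCollect arr 0 none []
  match indices with
  | some (l₀ :: l) => maxes.map (fun i => (PySem.List.pyGet? (l₀ :: l) i).getD 0)
  | _ => maxes

-- ===== PRECONDITION & SPEC =====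
-- Pre_ excludes exactly the inputs on which A raises IndexError: a truthy `indices` list shorter
-- than some position of the maximum of arr.  (B raises there too.)
def Pre_arg_maxes (arr : List Int) (indices : Option (List Int)) : Prop :=
  pvTruthy indices = false ∨
    ∀ i ∈ List.range arr.length,
      arr.getD i 0 = arr.foldl max (arr.headD 0) → i < (indices.getD []).length

instance (arr : List Int) (indices : Option (List Int)) : Decidable (Pre_arg_maxes arr indices) := by
  unfold Pre_arg_maxes; infer_instance

def pvWitness_arg_maxes : List Int × Option (List Int) := ([1, 3, 2, 3], some [10, 20, 30, 40])

def Spec_arg_maxes (arr : List Int) (indices : Option (List Int)) (out : List Int) : Prop := out = arg_maxes_alt arr indices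
instance (arr : List Int) (indices : Option (List Int)) (out : List Int) : Decidable (Spec_arg_maxes arr indices out) := by unfold Spec_arg_maxes; infer_instance

-- ===== CLAIM (what is proved, stated in full; the proofs are below) =====
def Claim_equal_arg_maxes : Prop := ∀ (arr : List Int) (indices : Option (List Int)), Dom_arg_maxes arr indices → Pre_arg_maxes arr indices → Spec_arg_maxes arr indices (arg_maxes arr indices)

-- ===== LEMMAS AND PROOFS =====

-- positions (counted from idx) of the elements of l equal to M
def maxIdxs (M : Int) : List Int → Int → List Int
  | [], _ => []
  | el :: rest, idx =>
      if el = M then idx :: maxIdxs M rest (idx + 1) else maxIdxs M rest (idx + 1)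

theorem aLoop_eq_map (M : Int) (indices : Option (List Int)) :
    ∀ (l : List Int) (idx : Int) (acc : List Int),
      aLoop M indices l idx acc = acc ++ (maxIdxs M l idx).map (pvOutVal indices) := by
  intro l
  induction l with
  | nil => intro idx acc; simp [aLoop, maxIdxs]
  | cons el rest ih =>
      intro idx acc
      by_cases h : el = M <;> simp [aLoop, maxIdxs, h, ih]

theorem altCollect_spec :
    ∀ (l : List Int) (idx b : Int) (acc : List Int),
      altCollect l idx (some b) acc =
        if l.foldl max b = b then acc ++ maxIdxs b l idx
        else maxIdxs (l.foldl max b) l idx := by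
  intro l
  induction l with
  | nil => intro idx b acc; simp [altCollect, maxIdxs]
  | cons el rest ih =>
      intro idx b acc
      have hfold : (el :: rest).foldl max b = rest.foldl max (max b el) := by simp [List.foldl]
      have hle : ∀ (c : Int), c ≤ rest.foldl max c := by
        intro c; exact (PySem.List.le_foldl_max rest c).1
      rcases lt_trichotomy el b with hlt | heq | hgt
      · -- el < b : skip branch
        have h1 : ¬ el > b := by omega
        have h2 : ¬ el = b := by omega
        have hmb : max b el = b := by omega
        simp only [altCollect, h1, if_false, h2, ih]
        rw [hfold, hmb]
        by_cases hall : rest.foldl max b = b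
        · simp [hall, maxIdxs, h2]
        · have hgtb : b < rest.foldl max b := lt_of_le_of_ne (hle b) (Ne.symm hall)
          have hne2 : ¬ el = rest.foldl max b := by omega
          simp [hall, maxIdxs, hne2]
      · -- el = b : append branch
        subst heq
        have h1 : ¬ el > el := by omega
        simp only [altCollect, h1, if_false, ih]
        have hmb : max el el = el := by omega
        rw [hfold, hmb]
        by_cases hall : rest.foldl max el = el
        · simp [hall, maxIdxs]
        · have hgtb : el < rest.foldl max el := lt_of_le_of_ne (hle el) (Ne.symm hall)
          have hne2 : ¬ el = rest.foldl max el := by omega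
          simp [hall, maxIdxs, hne2]
      · -- el > b : reset branch
        have hmb : max b el = el := by omega
        simp only [altCollect, if_pos hgt, ih]
        rw [hfold, hmb]
        have hcond : ¬ rest.foldl max el = b := by
          have := hle el; omega
        rw [if_neg hcond]
        by_cases hall : rest.foldl max el = el
        · simp [hall, maxIdxs]
        · have hgtb : el < rest.foldl max el := lt_of_le_of_ne (hle el) (Ne.symm hall)
          have hne2 : ¬ el = rest.foldl max el := by omega
          simp [hall, maxIdxs, hne2]

-- running maximum of arr = a :: rest is rest.foldl max a, and altCollect computes its positions
theorem altCollect_eq_maxIdxs (a : Int) (rest : List Int) :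
    altCollect (a :: rest) 0 none [] = maxIdxs (rest.foldl max a) (a :: rest) 0 := by
  have : altCollect (a :: rest) 0 none [] = altCollect rest 1 (some a) [0] := by
    simp [altCollect]
  rw [this, altCollect_spec]
  by_cases hall : rest.foldl max a = a
  · simp [hall, maxIdxs]
  · have hgt : a < rest.foldl max a :=
      lt_of_le_of_ne (PySem.List.le_foldl_max rest a).1 (Ne.symm hall)
    have hne : ¬ a = rest.foldl max a := by omega
    simp [hall, maxIdxs, hne]

-- ===== VERDICT (by name: the statement is the Claim_ definition above) =====
theorem arg_maxes_spec : Claim_equal_arg_maxes := by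
  intro arr indices _ _
  unfold Spec_arg_maxes arg_maxes arg_maxes_alt
  cases arr with
  | nil => cases indices with
    | none => simp [altCollect]
    | some l => cases l <;> simp [altCollect]
  | cons a rest =>
      have hmax : (PySem.List.max? (a :: rest) (fun x => x)).getD 0 = rest.foldl max a := by
        rw [PySem.List.max?_id_cons]; rfl
      have hA : aLoop ((PySem.List.max? (a :: rest) (fun x => x)).getD 0) indices (a :: rest) 0 []
          = (maxIdxs (rest.foldl max a) (a :: rest) 0).map (pvOutVal indices) := by
        rw [hmax, aLoop_eq_map]; simp
      have hB := altCollect_eq_maxIdxs a rest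
      cases indices with
      | none =>
          rw [hA, hB, show pvOutVal none = id from rfl, List.map_id]
          simp
      | some l =>
          cases l with
          | nil =>
              rw [hA, hB, show pvOutVal (some []) = id from rfl, List.map_id]
              simp
          | cons l₀ ltl =>
              rw [hA, hB]
              simp only [List.length_cons]
              rw [if_neg (by omega)]
              rfl
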